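-- pv_equiv track=rewrite | github.com/lucferreira-27/SonioxSRT | python/sonioxsrt/subtitles.py | _partition_chunks
-- ===== SOURCE A (Python) =====
-- from typing import Iterable, List, Optional, Sequence, Tuple, Union
--
-- def _partition_chunks(
--     chunks: Sequence[str], max_lines: int, max_cpl: int
-- ) -> Optional[List[str]]:
--     if max_lines <= 0:
--         return []
--     if not chunks:
--         return []
--
--     def helper(start: int, remaining: int) -> Optional[List[str]]:
--         if start == len(chunks):
--             return []
--         if remaining == 0:
--             return None
--
--         line = ""
--         for end in range(start, len(chunks)):
--             line = f"{line} {chunks[end]}".strip() if line else chunks[end]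
--             if len(line) > max_cpl:
--                 break
--             rest = helper(end + 1, remaining - 1)
--             if rest is not None:
--                 return [line, *rest]
--         return None
--
--     return helper(0, max_lines)
-- ===== SOURCE B (Python) =====
-- from typing import List, Optional, Sequence
--
--
-- def _partition_chunks(
--     chunks: Sequence[str], max_lines: int, max_cpl: int
-- ) -> Optional[List[str]]:
--     if max_lines <= 0:
--         return []
--     if not chunks:
--         return []
--
--     n = len(chunks)
--     # Bottom-up DP: need[s] = minimal number of lines needed for chunks[s:]
--     # (None = impossible), computed once.
--     need: List[Optional[int]] = [None] * (n + 1)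
--     need[n] = 0
--     for s in range(n - 1, -1, -1):
--         best = None
--         line = ""
--         for e in range(s, n):
--             line = f"{line} {chunks[e]}".strip() if line else chunks[e]
--             if len(line) > max_cpl:
--                 break
--             after = need[e + 1]
--             if after is not None and (best is None or after + 1 < best):
--                 best = after + 1
--         need[s] = best
--
--     # Reconstruct: at each position take the first end whose remainder still fits
--     # in the remaining line budget.
--     def build(s: int, r: int) -> Optional[List[str]]:
--         if s == n:
--             return []
--         line = ""
--         for e in range(s, n):
--             line = f"{line} {chunks[e]}".strip() if line else chunks[e]
--             if len(line) > max_cpl: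
--                 return None
--             after = need[e + 1]
--             if after is not None and after <= r - 1:
--                 rest = build(e + 1, r - 1)
--                 return None if rest is None else [line, *rest]
--         return None
--
--     return build(0, max_lines)
-- ===== Notes on version B (the rewrite author's own statement) =====
-- stated objective: alternative
-- what changed: Replaced A's backtracking recursion with a bottom-up DP need-table (minimal lines per suffix, computed once) plus a single greedy reconstruction pass that picks the first end whose remainder still fits the remaining line budget.
import Mathlib
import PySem

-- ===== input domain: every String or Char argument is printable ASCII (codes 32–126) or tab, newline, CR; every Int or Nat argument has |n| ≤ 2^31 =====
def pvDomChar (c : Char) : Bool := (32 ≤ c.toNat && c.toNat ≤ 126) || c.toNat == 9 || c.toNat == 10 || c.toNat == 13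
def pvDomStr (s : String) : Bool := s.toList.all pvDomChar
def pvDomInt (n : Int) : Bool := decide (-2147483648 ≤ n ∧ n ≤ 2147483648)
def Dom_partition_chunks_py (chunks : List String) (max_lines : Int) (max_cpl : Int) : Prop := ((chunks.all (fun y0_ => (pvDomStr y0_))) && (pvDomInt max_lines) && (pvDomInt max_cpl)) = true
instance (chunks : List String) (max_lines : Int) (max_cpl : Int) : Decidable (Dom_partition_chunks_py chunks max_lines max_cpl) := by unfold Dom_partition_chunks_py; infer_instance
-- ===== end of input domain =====

-- B replaces A's backtracking search by a bottom-up DP (a minimal-lines table over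
-- suffixes, computed once) followed by a single greedy reconstruction pass.

-- f"{line} {c}".strip() if line else c   (shared join step; line kept as List Char)
def pvJoin (line : List Char) (c : List Char) : List Char :=
  if line = [] then c else PySem.Chars.strip (line ++ ' ' :: c)

-- ===== PORT A =====
mutual
  -- helper(start, remaining), with the suffix chunks[start:] passed as a list
  def pvAhelper (mcpl : Int) : List String → Int → Option (List String)
    | [], _ => some []
    | c :: cs, r => if r = 0 then none else pvAloop mcpl c.toList cs r
  termination_by l _ => (l.length, 1)

  -- the 'for end in range(start, len(chunks))' loop body: line covers the chunks
  -- consumed so far, rest is what follows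
  def pvAloop (mcpl : Int) (line : List Char) (rest : List String) (r : Int) :
      Option (List String) :=
    if (line.length : Int) > mcpl then none
    else
      match pvAhelper mcpl rest (r - 1) with
      | some t => some (String.ofList line :: t)
      | none =>
        match rest with
        | [] => none
        | c :: cs => pvAloop mcpl (pvJoin line c.toList) cs r
  termination_by (rest.length + 1, 0)
end

def partition_chunks_py (chunks : List String) (max_lines : Int) (max_cpl : Int) :
    Option (List String) :=
  if max_lines ≤ 0 then some []
  else if chunks = [] then some []
  else pvAhelper max_cpl chunks max_lines

-- ===== PORT B =====
-- minimum of two optional line counts (None = impossible)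
def pvNeedMin : Option Nat → Option Nat → Option Nat
  | none, b => b
  | some a, none => some a
  | some a, some b => some (min a b)

-- need[s] read off the front of a suffix table (need of the whole suffix)
def pvHead (ns : List (Option Nat)) : Option Nat := ns.headD none

-- inner window scan of the need table: minimal lines for (line already open) ++ rest,
-- given ns = need table of rest (head = need of rest, tail = table of rest.tail)
def pvWin (mcpl : Int) (line : List Char) (rest : List String) (ns : List (Option Nat)) :
    Option Nat :=
  if (line.length : Int) > mcpl then none
  else
    match rest with
    | [] => (pvHead ns).map (· + 1)
    | c :: cs => pvNeedMin ((pvHead ns).map (· + 1))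
        (pvWin mcpl (pvJoin line c.toList) cs ns.tail)

-- need table for all suffixes, built right to left (the DP array `need`)
def pvNeeds (mcpl : Int) : List String → List (Option Nat)
  | [] => [some 0]
  | c :: cs =>
    let ns := pvNeeds mcpl cs
    pvWin mcpl c.toList cs ns :: ns

-- `after is not None and after <= r`
def pvFeas : Option Nat → Int → Bool
  | some k, r => decide ((k : Int) ≤ r)
  | none, _ => false

mutual
  -- reconstruction: build(s, r), suffix passed as a list with its need table
  def pvBuild (mcpl : Int) : List String → List (Option Nat) → Int → Option (List String)
    | [], _, _ => some []
    | c :: cs, ns, r => pvBloop mcpl c.toList cs ns.tail r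
  termination_by l _ _ => (l.length, 1)

  -- the reconstruction window scan: take the first end whose remainder fits in r - 1 lines
  def pvBloop (mcpl : Int) (line : List Char) (rest : List String)
      (ns : List (Option Nat)) (r : Int) : Option (List String) :=
    if (line.length : Int) > mcpl then none
    else if pvFeas (pvHead ns) (r - 1) then
      (pvBuild mcpl rest ns (r - 1)).map (String.ofList line :: ·)
    else
      match rest with
      | [] => none
      | c :: cs => pvBloop mcpl (pvJoin line c.toList) cs ns.tail r
  termination_by (rest.length + 1, 0)
end

def partition_chunks_py_alt (chunks : List String) (max_lines : Int) (max_cpl : Int) :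
    Option (List String) :=
  if max_lines ≤ 0 then some []
  else if chunks = [] then some []
  else pvBuild max_cpl chunks (pvNeeds max_cpl chunks) max_lines

-- ===== PRECONDITION & SPEC =====
def Spec_partition_chunks_py (chunks : List String) (max_lines : Int) (max_cpl : Int) (out : Option (List String)) : Prop := out = partition_chunks_py_alt chunks max_lines max_cpl
instance (chunks : List String) (max_lines : Int) (max_cpl : Int) (out : Option (List String)) : Decidable (Spec_partition_chunks_py chunks max_lines max_cpl out) := by unfold Spec_partition_chunks_py; infer_instance

-- ===== CLAIM (what is proved, stated in full; the proofs are below) =====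
def Claim_equal_partition_chunks_py : Prop := ∀ (chunks : List String) (max_lines : Int) (max_cpl : Int), Dom_partition_chunks_py chunks max_lines max_cpl → Spec_partition_chunks_py chunks max_lines max_cpl (partition_chunks_py chunks max_lines max_cpl)

-- ===== LEMMAS AND PROOFS =====

lemma pvHead_cons (a : Option Nat) (l : List (Option Nat)) : pvHead (a :: l) = a := rfl

-- unfolding equations (the match on rest written out)
lemma pvWin_nil (mcpl : Int) (line : List Char) (ns : List (Option Nat)) :
    pvWin mcpl line [] ns
      = if (line.length : Int) > mcpl then none else (pvHead ns).map (· + 1) := by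
  rw [pvWin.eq_def]

lemma pvWin_cons (mcpl : Int) (line : List Char) (c : String) (cs : List String)
    (ns : List (Option Nat)) :
    pvWin mcpl line (c :: cs) ns
      = if (line.length : Int) > mcpl then none
        else pvNeedMin ((pvHead ns).map (· + 1))
          (pvWin mcpl (pvJoin line c.toList) cs ns.tail) := by
  rw [pvWin.eq_def]

lemma pvAloop_eq (mcpl : Int) (line : List Char) (rest : List String) (r : Int) :
    pvAloop mcpl line rest r
      = if (line.length : Int) > mcpl then none
        else
          match pvAhelper mcpl rest (r - 1) with
          | some t => some (String.ofList line :: t)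
          | none =>
            match rest with
            | [] => none
            | c :: cs => pvAloop mcpl (pvJoin line c.toList) cs r := by
  rw [pvAloop.eq_def]

lemma pvBloop_eq (mcpl : Int) (line : List Char) (rest : List String)
    (ns : List (Option Nat)) (r : Int) :
    pvBloop mcpl line rest ns r
      = if (line.length : Int) > mcpl then none
        else if pvFeas (pvHead ns) (r - 1) then
          (pvBuild mcpl rest ns (r - 1)).map (String.ofList line :: ·)
        else
          match rest with
          | [] => none
          | c :: cs => pvBloop mcpl (pvJoin line c.toList) cs ns.tail r := by
  rw [pvBloop.eq_def]

-- every entry of the DP window minimum counts at least one line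
lemma pvWin_pos (mcpl : Int) :
    ∀ (rest : List String) (line : List Char) (ns : List (Option Nat)) (k : Nat),
      pvWin mcpl line rest ns = some k → 1 ≤ k := by
  intro rest
  induction rest with
  | nil =>
    intro line ns k h
    rw [pvWin_nil] at h
    split at h
    · exact absurd h (by simp)
    · cases hh : pvHead ns with
      | none => rw [hh] at h; exact absurd h (by simp)
      | some a => rw [hh] at h; simp only [Option.map_some, Option.some.injEq] at h; omega
  | cons c cs ih =>
    intro line ns k h
    rw [pvWin_cons] at h
    split at h
    · exact absurd h (by simp)
    · cases hh : pvHead ns with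
      | none =>
        rw [hh] at h
        exact ih _ _ _ h
      | some a =>
        rw [hh] at h
        cases hw : pvWin mcpl (pvJoin line c.toList) cs ns.tail with
        | none =>
          rw [hw] at h
          simp only [Option.map_some, pvNeedMin, Option.some.injEq] at h
          omega
        | some b =>
          have hb := ih _ _ _ hw
          rw [hw] at h
          simp only [Option.map_some, pvNeedMin, Option.some.injEq] at h
          omega

lemma pvFeas_needMin (a b : Option Nat) (r : Int) :
    pvFeas (pvNeedMin a b) r = (pvFeas a r || pvFeas b r) := by
  cases a with
  | none => cases b <;> rfl
  | some x =>
    cases b with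
    | none => simp [pvNeedMin, pvFeas]
    | some y =>
      simp only [pvNeedMin, pvFeas, ← Bool.decide_or, decide_eq_decide]
      push_cast
      omega

lemma pvFeas_map_succ (a : Option Nat) (r : Int) :
    pvFeas (a.map (· + 1)) r = pvFeas a (r - 1) := by
  cases a with
  | none => rfl
  | some k =>
    simp only [Option.map_some, pvFeas, decide_eq_decide]
    push_cast
    omega

-- if the window is infeasible for budget r, reconstruction fails too
lemma pvBloop_none_of_feas_false (mcpl : Int) :
    ∀ (rest : List String) (line : List Char) (ns : List (Option Nat)) (r : Int),
      pvFeas (pvWin mcpl line rest ns) r = false → pvBloop mcpl line rest ns r = none := by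
  intro rest
  induction rest with
  | nil =>
    intro line ns r h
    rw [pvWin_nil] at h
    rw [pvBloop_eq]
    split at h
    · rename_i hg; rw [if_pos hg]
    · rename_i hg
      rw [pvFeas_map_succ] at h
      rw [if_neg hg, h]
      simp only [Bool.false_eq_true, if_false]
  | cons c cs ih =>
    intro line ns r h
    rw [pvWin_cons] at h
    rw [pvBloop_eq]
    split at h
    · rename_i hg; rw [if_pos hg]
    · rename_i hg
      rw [pvFeas_needMin, pvFeas_map_succ, Bool.or_eq_false_iff] at h
      obtain ⟨h1, h2⟩ := h
      rw [if_neg hg, h1]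
      simp only [Bool.false_eq_true, if_false]
      exact ih _ _ _ h2

-- feasibility: A's helper succeeds iff the DP need of the suffix fits the budget
lemma pvFeasMain (mcpl : Int) : ∀ N : Nat,
    (∀ (l : List String) (r : Int), l.length ≤ N → 0 ≤ r →
      (pvAhelper mcpl l r).isSome = pvFeas (pvHead (pvNeeds mcpl l)) r)
    ∧ (∀ (rest : List String) (line : List Char) (r : Int), rest.length ≤ N → 1 ≤ r →
      (pvAloop mcpl line rest r).isSome = pvFeas (pvWin mcpl line rest (pvNeeds mcpl rest)) r) := by
  intro N
  induction N with
  | zero =>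
    constructor
    · intro l r hl hr
      have : l = [] := List.eq_nil_of_length_eq_zero (Nat.le_zero.mp hl)
      subst this
      simp only [pvAhelper, pvNeeds, pvHead_cons, pvFeas, Option.isSome_some]
      simp [hr]
    · intro rest line r hl hr
      have : rest = [] := List.eq_nil_of_length_eq_zero (Nat.le_zero.mp hl)
      subst this
      rw [pvAloop_eq, pvWin_nil]
      split
      · rfl
      · simp only [pvAhelper, pvNeeds, pvHead_cons, Option.map_some, pvFeas]
        simp
        omega
  | succ N ih =>
    obtain ⟨ihP, ihQ⟩ := ih
    have hP : ∀ (l : List String) (r : Int), l.length ≤ N + 1 → 0 ≤ r →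
        (pvAhelper mcpl l r).isSome = pvFeas (pvHead (pvNeeds mcpl l)) r := by
      intro l r hl hr
      match l with
      | [] =>
        simp only [pvAhelper, pvNeeds, pvHead_cons, Option.isSome_some, pvFeas]
        simp [hr]
      | c :: cs =>
        by_cases h0 : r = 0
        · subst h0
          have hA : pvAhelper mcpl (c :: cs) 0 = none := by simp [pvAhelper]
          rw [hA]
          show false = _
          cases hw : pvWin mcpl c.toList cs (pvNeeds mcpl cs) with
          | none => simp only [pvNeeds, pvHead_cons, hw]; rfl
          | some k =>
            have hk := pvWin_pos mcpl cs c.toList (pvNeeds mcpl cs) k hw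
            simp only [pvNeeds, pvHead_cons, hw, pvFeas]
            simp
            omega
        · have hr1 : 1 ≤ r := by omega
          have h1 : pvAhelper mcpl (c :: cs) r = pvAloop mcpl c.toList cs r := by
            simp [pvAhelper, h0]
          rw [h1]
          have h2 := ihQ cs c.toList r (by simp only [List.length_cons] at hl; omega) hr1
          rw [h2]
          simp only [pvNeeds, pvHead_cons]
    refine ⟨hP, ?_⟩
    intro rest line r hl hr
    match rest with
    | [] =>
      rw [pvAloop_eq, pvWin_nil]
      split
      · rfl
      · simp only [pvAhelper, pvNeeds, pvHead_cons, Option.map_some, pvFeas]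
        simp
        omega
    | c :: cs =>
      rw [pvAloop_eq, pvWin_cons]
      by_cases hg : (line.length : Int) > mcpl
      · rw [if_pos hg, if_pos hg]; rfl
      · rw [if_neg hg, if_neg hg]
        rw [pvFeas_needMin, pvFeas_map_succ]
        have hfe := hP (c :: cs) (r - 1) hl (by omega)
        have htail : (pvNeeds mcpl (c :: cs)).tail = pvNeeds mcpl cs := by
          simp [pvNeeds]
        rw [htail]
        cases hh : pvAhelper mcpl (c :: cs) (r - 1) with
        | some t =>
          rw [hh] at hfe
          rw [← hfe]
          rfl
        | none =>
          rw [hh] at hfe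
          rw [← hfe]
          simp only [Option.isSome_none, Bool.false_or]
          exact ihQ cs (pvJoin line c.toList) r (by simp only [List.length_cons] at hl; omega) hr


-- the two programs compute the same partition
lemma pvEqMain (mcpl : Int) : ∀ N : Nat,
    (∀ (l : List String) (r : Int), l.length ≤ N → 0 ≤ r →
      pvAhelper mcpl l r = pvBuild mcpl l (pvNeeds mcpl l) r)
    ∧ (∀ (rest : List String) (line : List Char) (r : Int), rest.length ≤ N → 1 ≤ r →
      pvAloop mcpl line rest r = pvBloop mcpl line rest (pvNeeds mcpl rest) r) := by
  intro N
  induction N with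
  | zero =>
    constructor
    · intro l r hl hr
      have : l = [] := List.eq_nil_of_length_eq_zero (Nat.le_zero.mp hl)
      subst this
      simp [pvAhelper, pvBuild]
    · intro rest line r hl hr
      have : rest = [] := List.eq_nil_of_length_eq_zero (Nat.le_zero.mp hl)
      subst this
      rw [pvAloop_eq, pvBloop_eq]
      split
      · rfl
      · have hfeT : pvFeas (pvHead (pvNeeds mcpl [])) (r - 1) = true := by
          simp only [pvNeeds, pvHead_cons, pvFeas]
          simp
          omega
        rw [hfeT]
        simp only [if_true]
        simp [pvAhelper, pvBuild]
  | succ N ih =>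
    obtain ⟨ihP, ihQ⟩ := ih
    have hP : ∀ (l : List String) (r : Int), l.length ≤ N + 1 → 0 ≤ r →
        pvAhelper mcpl l r = pvBuild mcpl l (pvNeeds mcpl l) r := by
      intro l r hl hr
      match l with
      | [] => simp [pvAhelper, pvBuild]
      | c :: cs =>
        by_cases h0 : r = 0
        · subst h0
          have hA : pvAhelper mcpl (c :: cs) 0 = none := by simp [pvAhelper]
          have hFe := (pvFeasMain mcpl (N + 1)).1 (c :: cs) 0 hl le_rfl
          rw [hA] at hFe
          have hfeF : pvFeas (pvWin mcpl c.toList cs (pvNeeds mcpl cs)) 0 = false := by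
            have : pvHead (pvNeeds mcpl (c :: cs))
                = pvWin mcpl c.toList cs (pvNeeds mcpl cs) := by
              simp [pvNeeds, pvHead_cons]
            rw [this] at hFe
            exact hFe.symm
          have hB := pvBloop_none_of_feas_false mcpl cs c.toList (pvNeeds mcpl cs) 0 hfeF
          rw [hA]
          have : pvBuild mcpl (c :: cs) (pvNeeds mcpl (c :: cs)) 0
              = pvBloop mcpl c.toList cs (pvNeeds mcpl cs) 0 := by
            simp [pvBuild, pvNeeds]
          rw [this, hB]
        · have hr1 : 1 ≤ r := by omega
          have h1 : pvAhelper mcpl (c :: cs) r = pvAloop mcpl c.toList cs r := by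
            simp [pvAhelper, h0]
          have h2 : pvBuild mcpl (c :: cs) (pvNeeds mcpl (c :: cs)) r
              = pvBloop mcpl c.toList cs (pvNeeds mcpl cs) r := by
            simp [pvBuild, pvNeeds]
          rw [h1, h2]
          exact ihQ cs c.toList r (by simp only [List.length_cons] at hl; omega) hr1
    refine ⟨hP, ?_⟩
    intro rest line r hl hr
    match rest with
    | [] =>
      rw [pvAloop_eq, pvBloop_eq]
      split
      · rfl
      · have hfeT : pvFeas (pvHead (pvNeeds mcpl [])) (r - 1) = true := by
          simp only [pvNeeds, pvHead_cons, pvFeas]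
          simp
          omega
        rw [hfeT]
        simp only [if_true]
        simp [pvAhelper, pvBuild]
    | c :: cs =>
      rw [pvAloop_eq, pvBloop_eq]
      by_cases hg : (line.length : Int) > mcpl
      · rw [if_pos hg, if_pos hg]
      · rw [if_neg hg, if_neg hg]
        have hfe := (pvFeasMain mcpl (N + 1)).1 (c :: cs) (r - 1) hl (by omega)
        have hhd : pvHead (pvNeeds mcpl (c :: cs))
            = pvWin mcpl c.toList cs (pvNeeds mcpl cs) := by
          simp [pvNeeds, pvHead_cons]
        have htail : (pvNeeds mcpl (c :: cs)).tail = pvNeeds mcpl cs := by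
          simp [pvNeeds]
        cases hh : pvAhelper mcpl (c :: cs) (r - 1) with
        | some t =>
          rw [hh] at hfe
          have hfeT : pvFeas (pvHead (pvNeeds mcpl (c :: cs))) (r - 1) = true := hfe.symm
          rw [hfeT]
          simp only [if_true]
          have heq := hP (c :: cs) (r - 1) hl (by omega)
          rw [hh] at heq
          rw [← heq]
          rfl
        | none =>
          rw [hh] at hfe
          have hfeF : pvFeas (pvHead (pvNeeds mcpl (c :: cs))) (r - 1) = false := hfe.symm
          rw [hfeF]
          simp only [Bool.false_eq_true, if_false]
          rw [htail]
          exact ihQ cs (pvJoin line c.toList) r (by simp only [List.length_cons] at hl; omega) hr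

-- ===== VERDICT (by name: the statement is the Claim_ definition above) =====
theorem partition_chunks_py_spec : Claim_equal_partition_chunks_py := by
  intro chunks max_lines max_cpl _
  unfold Spec_partition_chunks_py partition_chunks_py partition_chunks_py_alt
  by_cases h0 : max_lines ≤ 0
  · simp [h0]
  · simp only [h0, if_false]
    by_cases hc : chunks = []
    · simp [hc]
    · simp only [hc, if_false]
      exact (pvEqMain max_cpl chunks.length).1 chunks max_lines le_rfl (by omega)
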